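-- pv_equiv track=rewrite | github.com/quandxbp/novobi-python-exercise | battle.py | event4_EncounterGollum
-- ===== SOURCE A (Python) =====
-- def event4_EncounterGollum(knightRingSignList, ringSignO):
--     foundIndex = -1
--
--     for index in range(0, len(knightRingSignList)):
--         if knightRingSignList[index] == ringSignO:
--             foundIndex = index
--
--     if foundIndex != -1:
--         knightRingSignList.pop(foundIndex)
--
--     return knightRingSignList
-- ===== SOURCE B (Python) =====
-- def event4_EncounterGollum(knightRingSignList, ringSignO):
--     # Remove the last occurrence by reversing in place, removing the first
--     # occurrence, and reversing back (mutates the same list object, like A).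
--     knightRingSignList.reverse()
--     try:
--         knightRingSignList.remove(ringSignO)
--     except ValueError:
--         pass
--     knightRingSignList.reverse()
--     return knightRingSignList
-- ===== Notes on version B (the rewrite author's own statement) =====
-- stated objective: idiomatic
-- what changed: Replaces the index-tracking forward scan plus pop with the reverse/remove-first-occurrence/reverse idiom, with no index arithmetic at all.
import Mathlib
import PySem

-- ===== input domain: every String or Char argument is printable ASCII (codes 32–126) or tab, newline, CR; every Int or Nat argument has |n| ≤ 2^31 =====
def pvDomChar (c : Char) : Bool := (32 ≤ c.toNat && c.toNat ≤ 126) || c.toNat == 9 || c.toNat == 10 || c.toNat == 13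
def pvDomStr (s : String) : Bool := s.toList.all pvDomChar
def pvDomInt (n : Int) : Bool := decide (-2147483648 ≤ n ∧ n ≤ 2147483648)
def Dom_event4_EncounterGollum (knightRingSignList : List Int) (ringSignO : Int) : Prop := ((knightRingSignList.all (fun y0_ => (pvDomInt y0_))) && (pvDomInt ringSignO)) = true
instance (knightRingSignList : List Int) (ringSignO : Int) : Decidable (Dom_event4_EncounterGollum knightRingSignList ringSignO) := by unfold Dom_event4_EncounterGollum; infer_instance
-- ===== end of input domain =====

-- B replaces A's index-tracking forward scan + pop with the reverse / remove-first / reverse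
-- idiom (no index arithmetic); equivalence is about the RETURN value — both Pythons mutate the
-- argument list in place and leave it in the same final state.

-- ===== PORT A =====
def event4_EncounterGollum (knightRingSignList : List Int) (ringSignO : Int) : List Int :=
  -- foundIndex = -1; for index in range(0, len(...)): if xs[index] == o: foundIndex = index
  let foundIndex : Int :=
    (PySem.List.pyRange 0 knightRingSignList.length 1).foldl
      (fun acc index =>
        if PySem.List.pyGetD knightRingSignList index 0 = ringSignO then index else acc)
      (-1)
  if foundIndex ≠ -1 then
    -- knightRingSignList.pop(foundIndex); foundIndex is a valid index here, so pop? is some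
    match PySem.List.pop? knightRingSignList foundIndex with
    | some r => r.2
    | none => knightRingSignList
  else knightRingSignList

-- ===== PORT B =====
def event4_EncounterGollum_alt (knightRingSignList : List Int) (ringSignO : Int) : List Int :=
  let r := knightRingSignList.reverse
  -- try: r.remove(ringSignO) except ValueError: pass
  let r2 := match PySem.List.remove? r ringSignO with
    | some t => t
    | none => r
  r2.reverse

-- ===== PRECONDITION & SPEC =====
def Spec_event4_EncounterGollum (knightRingSignList : List Int) (ringSignO : Int) (out : List Int) : Prop := out = event4_EncounterGollum_alt knightRingSignList ringSignO
instance (knightRingSignList : List Int) (ringSignO : Int) (out : List Int) : Decidable (Spec_event4_EncounterGollum knightRingSignList ringSignO out) := by unfold Spec_event4_EncounterGollum; infer_instance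

-- ===== CLAIM (what is proved, stated in full; the proofs are below) =====
def Claim_equal_event4_EncounterGollum : Prop := ∀ (knightRingSignList : List Int) (ringSignO : Int), Dom_event4_EncounterGollum knightRingSignList ringSignO → Spec_event4_EncounterGollum knightRingSignList ringSignO (event4_EncounterGollum knightRingSignList ringSignO)

-- ===== LEMMAS AND PROOFS =====

-- A's loop result (the last index whose element equals o), as its own abbreviation for lemmas.
def pvFoundA (xs : List Int) (o : Int) : Int :=
  (PySem.List.pyRange 0 xs.length 1).foldl
    (fun acc index => if PySem.List.pyGetD xs index 0 = o then index else acc) (-1)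

theorem pvFoundA_snoc (ys : List Int) (y o : Int) :
    pvFoundA (ys ++ [y]) o = if y = o then (ys.length : Int) else pvFoundA ys o := by
  unfold pvFoundA
  have hlen : ((ys ++ [y]).length : Int) = (ys.length : Int) + 1 := by simp
  rw [hlen, PySem.List.pyRange_one_succ_right (by positivity), List.foldl_append]
  have hcongr :
      (PySem.List.pyRange 0 (ys.length : Int) 1).foldl
        (fun acc index => if PySem.List.pyGetD (ys ++ [y]) index 0 = o then index else acc) (-1)
      = (PySem.List.pyRange 0 (ys.length : Int) 1).foldl
        (fun acc index => if PySem.List.pyGetD ys index 0 = o then index else acc) (-1) := by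
    apply PySem.List.foldl_congr_mem
    intro acc i hi
    rw [PySem.List.mem_pyRange_one] at hi
    rw [PySem.List.pyGetD_eq_getElem _ _ hi.1 (by simp; omega),
      PySem.List.pyGetD_eq_getElem _ _ hi.1 hi.2,
      List.getElem_append_left (by omega)]
  rw [hcongr]
  simp only [List.foldl_cons, List.foldl_nil]
  have hget : PySem.List.pyGetD (ys ++ [y]) (ys.length : Int) 0 = y := by
    rw [PySem.List.pyGetD_eq_getElem _ _ (by positivity) (by simp)]
    simp
  rw [hget]

theorem pvFoundA_bounds (xs : List Int) (o : Int) :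
    pvFoundA xs o = -1 ∨ (0 ≤ pvFoundA xs o ∧ pvFoundA xs o < (xs.length : Int)) := by
  induction xs using List.reverseRecOn with
  | nil => left; rfl
  | append_singleton ys y ih =>
    rw [pvFoundA_snoc]
    by_cases h : y = o
    · right
      exact ⟨by simp [h], by simp [h]⟩
    · simp only [h, if_false]
      rcases ih with h1 | h2
      · left; exact h1
      · right
        refine ⟨h2.1, ?_⟩
        have := h2.2
        simp only [List.length_append, List.length_cons, List.length_nil]
        push_cast
        omega

-- The port, re-read through pvFoundA (definitional).
theorem event4_def (xs : List Int) (o : Int) :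
    event4_EncounterGollum xs o =
      if pvFoundA xs o ≠ -1 then
        match PySem.List.pop? xs (pvFoundA xs o) with
        | some r => r.2
        | none => xs
      else xs := rfl

theorem pvA_snoc_eq (ys : List Int) (o : Int) :
    event4_EncounterGollum (ys ++ [o]) o = ys := by
  rw [event4_def, pvFoundA_snoc, if_pos rfl,
    if_pos (show (ys.length : Int) ≠ -1 by have := Int.natCast_nonneg ys.length; omega)]
  have hpop : PySem.List.pop? (ys ++ [o]) (ys.length : Int) = some (o, ys) := by
    have := PySem.List.pop?_natCast (ys ++ [o]) ys.length (by simp)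
    simpa [List.eraseIdx_append_of_length_le (le_refl ys.length)] using this
  rw [hpop]

theorem pvA_snoc_ne (ys : List Int) (y o : Int) (hy : y ≠ o) :
    event4_EncounterGollum (ys ++ [y]) o = event4_EncounterGollum ys o ++ [y] := by
  rw [event4_def, event4_def, pvFoundA_snoc, if_neg hy]
  rcases pvFoundA_bounds ys o with h1 | ⟨h2a, h2b⟩
  · simp [h1]
  · have hne : pvFoundA ys o ≠ -1 := by omega
    rw [if_pos hne, if_pos hne]
    have hk : pvFoundA ys o = ((pvFoundA ys o).toNat : Int) := by omega
    have hkl : (pvFoundA ys o).toNat < ys.length := by omega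
    rw [hk, PySem.List.pop?_natCast ys _ hkl,
      PySem.List.pop?_natCast (ys ++ [y]) _ (by simp; omega)]
    simp [List.eraseIdx_append_of_lt_length hkl]

theorem pvB_snoc_eq (ys : List Int) (o : Int) :
    event4_EncounterGollum_alt (ys ++ [o]) o = ys := by
  simp only [event4_EncounterGollum_alt, List.reverse_append, List.reverse_cons,
    List.reverse_nil, List.nil_append, List.singleton_append]
  unfold PySem.List.remove?
  rw [List.idxOf?_cons]
  simp

theorem pvB_snoc_ne (ys : List Int) (y o : Int) (hy : y ≠ o) :
    event4_EncounterGollum_alt (ys ++ [y]) o = event4_EncounterGollum_alt ys o ++ [y] := by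
  simp only [event4_EncounterGollum_alt, List.reverse_append, List.reverse_cons,
    List.reverse_nil, List.nil_append, List.singleton_append]
  unfold PySem.List.remove?
  rw [List.idxOf?_cons]
  have hne : (y == o) = false := by simp [hy]
  rw [hne]
  cases h : List.idxOf? o ys.reverse with
  | none => simp
  | some k => simp

theorem event4_eq_alt (xs : List Int) (o : Int) :
    event4_EncounterGollum xs o = event4_EncounterGollum_alt xs o := by
  induction xs using List.reverseRecOn with
  | nil => rfl
  | append_singleton ys y ih =>
    by_cases hy : y = o
    · subst hy
      rw [pvA_snoc_eq, pvB_snoc_eq]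
    · rw [pvA_snoc_ne ys y o hy, pvB_snoc_ne ys y o hy, ih]

-- ===== VERDICT (by name: the statement is the Claim_ definition above) =====
theorem event4_EncounterGollum_spec : Claim_equal_event4_EncounterGollum := by
  intro xs o _
  unfold Spec_event4_EncounterGollum
  exact event4_eq_alt xs o
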